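-- pv_equiv track=rewrite | github.com/JonathonRiley/advent_of_code | 2021/day9/solution.py | top_three_basins
-- ===== SOURCE A (Python) =====
-- def traverse_component(grid, i, j):
--     grid[i][j] = False
--     size = 1
--     if i > 0 and grid[i-1][j]:
--         size += traverse_component(grid, i-1, j)
--     if j > 0 and grid[i][j-1]:
--         size += traverse_component(grid, i, j-1)
--     if i < len(grid)-1 and grid[i+1][j]:
--         size += traverse_component(grid, i+1, j)
--     if j < len(grid[0])-1 and grid[i][j+1]:
--         size += traverse_component(grid, i, j+1)
--     return size
--
-- def top_three_basins(nrows, ncols, grid):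
--     basin_size_1 = 0
--     basin_size_2 = 0
--     basin_size_3 = 0
--     for i in range(nrows):
--         for j in range(ncols):
--             if grid[i][j]:
--                 temp = traverse_component(grid, i, j)
--                 if temp > basin_size_1:
--                     basin_size_3 = basin_size_2
--                     basin_size_2 = basin_size_1
--                     basin_size_1 = temp
--                 elif temp > basin_size_2:
--                     basin_size_3 = basin_size_2
--                     basin_size_2 = temp
--                 elif temp > basin_size_3:
--                     basin_size_3 = temp
--     return basin_size_1, basin_size_2, basin_size_3
-- ===== SOURCE B (Python) =====
-- def top_three_basins(nrows, ncols, grid):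
--     # Iterative explicit-stack flood fill + sort-based top-3 selection.
--     # Mutates grid in place (clears visited cells) just as A does.
--     R = len(grid)
--     C = len(grid[0]) if grid else 0
--     sizes = []
--     for i in range(nrows):
--         for j in range(ncols):
--             if grid[i][j]:
--                 size = 0
--                 stack = [(i, j)]
--                 while stack:
--                     r, c = stack.pop()
--                     if grid[r][c]:
--                         grid[r][c] = False
--                         size += 1
--                         if c + 1 < C:
--                             stack.append((r, c + 1))
--                         if r + 1 < R:
--                             stack.append((r + 1, c))
--                         if c > 0:
--                             stack.append((r, c - 1))
--                         if r > 0: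
--                             stack.append((r - 1, c))
--                 sizes.append(size)
--     ordered = sorted(sizes, reverse=True) + [0, 0, 0]
--     return ordered[0], ordered[1], ordered[2]
-- ===== Notes on version B (the rewrite author's own statement) =====
-- stated objective: alternative
-- what changed: Replaced the recursive 4-way DFS plus a running top-3 if/elif cascade by an iterative explicit-stack flood fill that collects all basin sizes in a list and then takes the first three entries of the descending sort (padded with zeros).
-- outside the precondition, e.g. on top_three_basins(1, 1, [[True], [False, True]]): A returns (1, 0, 0), B returns (1, 0, 0)
import Mathlib
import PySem

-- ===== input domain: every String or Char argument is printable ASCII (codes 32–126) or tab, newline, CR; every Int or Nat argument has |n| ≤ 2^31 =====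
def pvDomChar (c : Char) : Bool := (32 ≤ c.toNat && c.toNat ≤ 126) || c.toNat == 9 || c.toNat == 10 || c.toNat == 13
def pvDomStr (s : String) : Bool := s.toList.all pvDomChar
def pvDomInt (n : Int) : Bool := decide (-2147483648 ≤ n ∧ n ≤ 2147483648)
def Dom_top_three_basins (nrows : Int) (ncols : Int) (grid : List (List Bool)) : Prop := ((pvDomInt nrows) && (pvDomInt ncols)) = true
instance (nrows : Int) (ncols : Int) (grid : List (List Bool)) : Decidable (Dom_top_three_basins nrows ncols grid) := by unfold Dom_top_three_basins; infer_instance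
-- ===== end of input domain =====

-- B replaces A's recursive DFS + running top-3 cascade by an explicit-stack flood fill that
-- collects all basin sizes and sorts them descending; equivalence is about the return value
-- (both Pythons mutate `grid` in place, clearing exactly the same cells).

-- ===== PORT A =====
-- grid[i][j] (read) and grid[i][j] = False (write); loop indices from range(...) are ≥ 0, so Nat
def get2 (g : List (List Bool)) (i j : Nat) : Bool := (g.getD i []).getD j false
def set2 (g : List (List Bool)) (i j : Nat) : List (List Bool) := g.set i ((g.getD i []).set j false)
-- number of True cells; used only as fuel for travA / termination measure for loopB
def trues (g : List (List Bool)) : Nat := (g.map (fun r => r.count true)).sum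

-- termination helpers, cited by loopB's decreasing_by
theorem count_set_false (r : List Bool) (j : Nat) (h : r.getD j false = true) :
    (r.set j false).count true < r.count true := by
  induction r generalizing j with
  | nil => simp at h
  | cons b t ih =>
    cases j with
    | zero => simp at h; simp [h]
    | succ j =>
      simp only [List.getD] at h
      have := ih j (by simpa using h)
      simp [List.count_cons]
      omega

theorem trues_set2_lt (g : List (List Bool)) (i j : Nat) (h : get2 g i j = true) :
    trues (set2 g i j) < trues g := by
  induction g generalizing i with
  | nil => simp [get2] at h
  | cons r t ih =>
    cases i with
    | zero =>
      simp only [get2, List.getD] at h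
      simp [set2, trues, List.set]
      have := count_set_false r j (by simpa using h)
      omega
    | succ i =>
      simp only [get2, List.getD] at h
      have := ih i (by simpa [get2] using h)
      simp [set2, trues, List.set] at this ⊢
      omega

-- if temp > basin_size_1: … elif temp > basin_size_2: … elif temp > basin_size_3: …
def bump3 (t : Int × Int × Int) (x : Int) : Int × Int × Int :=
  if x > t.1 then (x, t.1, t.2.1)
  else if x > t.2.1 then (t.1, x, t.2.1)
  else if x > t.2.2 then (t.1, t.2.1, x)
  else t

-- traverse_component; fuel (= number of True cells at the call site) only makes the Python
-- recursion total in Lean; it is always sufficient (trues_le fuel hypotheses in the lemmas below).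
-- `i < len(grid)-1` is written `i+1 < length` (same test on Nat), len(grid[0]) is (headD []).length
def travA (fuel : Nat) (g : List (List Bool)) (i j : Nat) : List (List Bool) × Int :=
  match fuel with
  | 0 => (g, 1)
  | fuel + 1 =>
    let g0 := set2 g i j
    let p1 := if 0 < i ∧ get2 g0 (i-1) j then travA fuel g0 (i-1) j else (g0, 0)
    let p2 := if 0 < j ∧ get2 p1.1 i (j-1) then travA fuel p1.1 i (j-1) else (p1.1, 0)
    let p3 := if i + 1 < p2.1.length ∧ get2 p2.1 (i+1) j then travA fuel p2.1 (i+1) j else (p2.1, 0)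
    let p4 := if j + 1 < (p3.1.headD []).length ∧ get2 p3.1 i (j+1) then travA fuel p3.1 i (j+1) else (p3.1, 0)
    (p4.1, 1 + p1.2 + p2.2 + p3.2 + p4.2)

def top_three_basins (nrows : Int) (ncols : Int) (grid : List (List Bool)) : Int × Int × Int :=
  ((List.range nrows.toNat).foldl (fun st i =>
      (List.range ncols.toNat).foldl (fun (st : List (List Bool) × Int × Int × Int) j =>
        if get2 st.1 i j then
          let temp := travA (trues st.1) st.1 i j
          (temp.1, bump3 st.2 temp.2)
        else st) st)
    (grid, ((0:Int), (0:Int), (0:Int)))).2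

-- ===== PORT B =====
-- while stack: r,c = stack.pop(); … — the Python list stack is kept top-first (append = cons)
def loopB (R C : Nat) (g : List (List Bool)) (stack : List (Nat × Nat)) (size : Int) :
    List (List Bool) × Int :=
  match stack with
  | [] => (g, size)
  | (r, c) :: rest =>
    if h : get2 g r c then
      loopB R C (set2 g r c)
        ((if 0 < r then [((r-1 : Nat), c)] else []) ++
         (if 0 < c then [(r, (c-1 : Nat))] else []) ++
         (if r + 1 < R then [(r+1, c)] else []) ++
         (if c + 1 < C then [(r, c+1)] else []) ++ rest)
        (size + 1)
    else loopB R C g rest size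
termination_by 5 * trues g + stack.length
decreasing_by
  · have h1 := trues_set2_lt g r c h
    split_ifs <;> simp <;> omega
  · simp

def top_three_basins_alt (nrows : Int) (ncols : Int) (grid : List (List Bool)) : Int × Int × Int :=
  let R := grid.length
  let C := (grid.headD []).length   -- len(grid[0]) if grid else 0
  let st := (List.range nrows.toNat).foldl (fun st i =>
      (List.range ncols.toNat).foldl (fun (st : List (List Bool) × List Int) j =>
        if get2 st.1 i j then
          let r := loopB R C st.1 [(i, j)] 0
          (r.1, st.2 ++ [r.2])
        else st) st)
    (grid, ([] : List Int))
  let ordered := PySem.List.sorted st.2 (fun x => x) true ++ [0, 0, 0]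
  (ordered.getD 0 0, ordered.getD 1 0, ordered.getD 2 0)

-- ===== PRECONDITION & SPEC =====
-- When the scan window is non-empty, Pre_ excludes ragged grids (A's traversal bounds every row
-- by len(grid[0]) and raises IndexError on most of them) and windows exceeding the grid, where
-- grid[i][j] raises.
def Pre_top_three_basins (nrows : Int) (ncols : Int) (grid : List (List Bool)) : Prop :=
  (nrows ≤ 0 ∨ ncols ≤ 0) ∨
  ((∀ r ∈ grid, r.length = (grid.headD []).length) ∧
   nrows ≤ (grid.length : Int) ∧ ncols ≤ ((grid.headD []).length : Int))

instance (nrows : Int) (ncols : Int) (grid : List (List Bool)) : Decidable (Pre_top_three_basins nrows ncols grid) := by unfold Pre_top_three_basins; infer_instance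

def pvWitness_top_three_basins : Int × Int × List (List Bool) :=
  (2, 3, [[true, true, false], [false, true, true]])

def Spec_top_three_basins (nrows : Int) (ncols : Int) (grid : List (List Bool)) (out : Int × Int × Int) : Prop := out = top_three_basins_alt nrows ncols grid
instance (nrows : Int) (ncols : Int) (grid : List (List Bool)) (out : Int × Int × Int) : Decidable (Spec_top_three_basins nrows ncols grid out) := by unfold Spec_top_three_basins; infer_instance

-- ===== CLAIM (what is proved, stated in full; the proofs are below) =====
def Claim_equal_top_three_basins : Prop := ∀ (nrows : Int) (ncols : Int) (grid : List (List Bool)), Dom_top_three_basins nrows ncols grid → Pre_top_three_basins nrows ncols grid → Spec_top_three_basins nrows ncols grid (top_three_basins nrows ncols grid)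

-- ===== LEMMAS AND PROOFS =====

def Shape (R C : Nat) (g : List (List Bool)) : Prop :=
  g.length = R ∧ ∀ r ∈ g, r.length = C

theorem shape_set2 {R C : Nat} {g : List (List Bool)} (hs : Shape R C g) (i j : Nat) :
    Shape R C (set2 g i j) := by
  by_cases hi : i < g.length
  · refine ⟨by simpa [set2] using hs.1, ?_⟩
    intro r hr
    rcases List.mem_or_eq_of_mem_set hr with h | h
    · exact hs.2 r h
    · subst h
      rw [List.length_set, List.getD_eq_getElem g [] hi]
      exact hs.2 _ (List.getElem_mem hi)
  · have : set2 g i j = g := by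
      simp [set2]
      exact List.set_eq_of_length_le (by omega)
    rw [this]; exact hs

theorem get2_lt {g : List (List Bool)} {i j : Nat} (h : get2 g i j = true) :
    i < g.length ∧ j < (g.getD i []).length := by
  unfold get2 at h
  by_cases hi : i < g.length
  · refine ⟨hi, ?_⟩
    by_cases hj : j < (g.getD i []).length
    · exact hj
    · rw [List.getD_eq_default (g.getD i []) false (by omega)] at h; simp at h
  · rw [show g.getD i [] = [] from List.getD_eq_default g [] (by omega)] at h; simp at h

theorem count_set_false_le (r : List Bool) (j : Nat) :
    (r.set j false).count true ≤ r.count true := by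
  induction r generalizing j with
  | nil => simp
  | cons b t ih =>
    cases j with
    | zero =>
      cases b <;> simp
    | succ j => have := ih j; simp [List.count_cons]; omega

theorem trues_set2_le (g : List (List Bool)) (i j : Nat) :
    trues (set2 g i j) ≤ trues g := by
  induction g generalizing i with
  | nil => simp [set2, trues]
  | cons r t ih =>
    cases i with
    | zero =>
      have := count_set_false_le r j
      simp [set2, trues, List.set]
      omega
    | succ i =>
      have := ih i
      simp [set2, trues, List.set] at this ⊢
      omega

theorem trues_pos {g : List (List Bool)} {i j : Nat} (h : get2 g i j = true) : 0 < trues g := by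
  obtain ⟨hi, hj⟩ := get2_lt h
  have hrow : g.getD i [] ∈ g := by
    rw [List.getD_eq_getElem g [] hi]; exact List.getElem_mem hi
  have hmem : true ∈ g.getD i [] := by
    have : (g.getD i []).getD j false = true := by
      unfold get2 at h; exact h
    rw [List.getD_eq_getElem _ false hj] at this
    rw [← this]; exact List.getElem_mem hj
  have hc : 0 < (g.getD i []).count true := List.count_pos_iff.mpr hmem
  have : (g.getD i []).count true ∈ g.map (fun r => r.count true) := List.mem_map_of_mem hrow
  have := List.single_le_sum (l := g.map (fun r => r.count true)) (by intro x hx; omega) _ this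
  unfold trues; omega

theorem travA_trues_le (f : Nat) (g : List (List Bool)) (i j : Nat) :
    trues (travA f g i j).1 ≤ trues g := by
  induction f generalizing g i j with
  | zero => simp [travA]
  | succ f ih =>
    have step : ∀ (c : Prop) [Decidable c] (g' : List (List Bool)) (a b : Nat),
        trues (if c then travA f g' a b else (g', 0)).1 ≤ trues g' := by
      intro c _ g' a b
      split
      · exact ih g' a b
      · simp
    simp only [travA]
    refine le_trans (le_trans (step _ _ _ _) (le_trans (step _ _ _ _)
      (le_trans (step _ _ _ _) (le_trans (step _ _ _ _) (trues_set2_le g i j))))) le_rfl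

theorem travA_shape {R C : Nat} (f : Nat) {g : List (List Bool)} (hs : Shape R C g) (i j : Nat) :
    Shape R C (travA f g i j).1 := by
  induction f generalizing g i j with
  | zero => simpa [travA] using hs
  | succ f ih =>
    have step : ∀ (c : Prop) [Decidable c] (g' : List (List Bool)) (a b : Nat),
        Shape R C g' → Shape R C (if c then travA f g' a b else (g', 0)).1 := by
      intro c _ g' a b hg'
      split
      · exact ih hg' a b
      · exact hg'
    simp only [travA]
    exact step _ _ _ _ (step _ _ _ _ (step _ _ _ _ (step _ _ _ _ (shape_set2 hs i j))))

theorem one_le_sum {a b c d : Int} (ha : 0 ≤ a) (hb : 0 ≤ b) (hc : 0 ≤ c) (hd : 0 ≤ d) :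
    (1 : Int) ≤ 1 + a + b + c + d := by omega

theorem travA_size_pos (f : Nat) (g : List (List Bool)) (i j : Nat) :
    1 ≤ (travA f g i j).2 := by
  induction f generalizing g i j with
  | zero => simp [travA]
  | succ f ih =>
    have step : ∀ (c : Prop) [Decidable c] (g' : List (List Bool)) (a b : Nat),
        0 ≤ (if c then travA f g' a b else (g', 0)).2 := by
      intro c _ g' a b
      split
      · exact le_trans (by omega) (ih g' a b)
      · simp
    simp only [travA]
    exact one_le_sum (step _ _ _ _) (step _ _ _ _) (step _ _ _ _) (step _ _ _ _)

theorem loopB_nil (R C : Nat) (g : List (List Bool)) (size : Int) :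
    loopB R C g [] size = (g, size) := by
  rw [loopB]

theorem loopB_cons_true (R C : Nat) {g : List (List Bool)} {r c : Nat}
    (rest : List (Nat × Nat)) (size : Int) (h : get2 g r c = true) :
    loopB R C g ((r, c) :: rest) size =
      loopB R C (set2 g r c)
        ((if 0 < r then [((r-1 : Nat), c)] else []) ++
         (if 0 < c then [(r, (c-1 : Nat))] else []) ++
         (if r + 1 < R then [(r+1, c)] else []) ++
         (if c + 1 < C then [(r, c+1)] else []) ++ rest)
        (size + 1) := by
  rw [loopB]; simp [h]

theorem loopB_cons_false (R C : Nat) {g : List (List Bool)} {r c : Nat}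
    (rest : List (Nat × Nat)) (size : Int) (h : get2 g r c = false) :
    loopB R C g ((r, c) :: rest) size = loopB R C g rest size := by
  rw [loopB]; simp [h]

theorem shape_headD {R C : Nat} {g : List (List Bool)} (hs : Shape R C g) (hR : 0 < R) :
    (g.headD []).length = C := by
  cases g with
  | nil => have := hs.1; simp at this; omega
  | cons r t => exact hs.2 r (by simp)

theorem ite_shape {R C : Nat} {g : List (List Bool)} (hs : Shape R C g)
    (c : Prop) [Decidable c] (f a b : Nat) :
    Shape R C ((if c then travA f g a b else (g, 0)).1) := by
  split
  · exact travA_shape f hs a b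
  · exact hs

theorem ite_trues_le (g : List (List Bool)) (c : Prop) [Decidable c] (f a b : Nat) :
    trues ((if c then travA f g a b else (g, 0)).1) ≤ trues g := by
  split
  · exact travA_trues_le f g a b
  · simp

theorem seg {R C : Nat} (f : Nat)
    (ih : ∀ (g : List (List Bool)) (i j : Nat) (rest : List (Nat × Nat)) (acc : Int),
        Shape R C g → trues g ≤ f → get2 g i j = true →
        loopB R C g ((i, j) :: rest) acc =
          loopB R C (travA f g i j).1 rest (acc + (travA f g i j).2))
    (g : List (List Bool)) (cond : Prop) [Decidable cond] (i j : Nat)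
    (rest : List (Nat × Nat)) (acc : Int) (hs : Shape R C g) (hf : trues g ≤ f) :
    loopB R C g ((if cond then [(i, j)] else []) ++ rest) acc =
      loopB R C (if cond ∧ get2 g i j = true then travA f g i j else (g, 0)).1 rest
        (acc + (if cond ∧ get2 g i j = true then travA f g i j else (g, 0)).2) := by
  by_cases hc : cond
  · by_cases hg : get2 g i j = true
    · rw [if_pos (⟨hc, hg⟩ : cond ∧ get2 g i j = true), if_pos hc]
      exact ih g i j rest acc hs hf hg
    · rw [if_neg (by tauto : ¬ (cond ∧ get2 g i j = true)), if_pos hc]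
      simp only [List.singleton_append]
      rw [loopB_cons_false R C rest acc (by simpa using hg)]
      simp
  · rw [if_neg (by tauto : ¬ (cond ∧ get2 g i j = true)), if_neg hc]
    simp

-- the stack lemma: the explicit-stack fill processes one DFS tree exactly like traverse_component
theorem loopB_travA {R C : Nat} :
    ∀ (f : Nat) (g : List (List Bool)) (i j : Nat) (rest : List (Nat × Nat)) (acc : Int),
      Shape R C g → trues g ≤ f → get2 g i j = true →
      loopB R C g ((i, j) :: rest) acc =
        loopB R C (travA f g i j).1 rest (acc + (travA f g i j).2) := by
  intro f
  induction f with
  | zero =>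
    intro g i j rest acc hs hf hg
    have := trues_pos hg; omega
  | succ f ih =>
    intro g i j rest acc hs hf hg
    obtain ⟨hi, hj⟩ := get2_lt hg
    have hiR : i < R := hs.1 ▸ hi
    have hs0 := shape_set2 hs i j
    have hf0 : trues (set2 g i j) ≤ f := by have := trues_set2_lt g i j hg; omega
    rw [loopB_cons_true R C rest acc hg]
    simp only [travA]
    set p1 := if 0 < i ∧ get2 (set2 g i j) (i-1) j = true
        then travA f (set2 g i j) (i-1) j else (set2 g i j, 0) with hp1
    have hs1 : Shape R C p1.1 := ite_shape hs0 _ f (i-1) j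
    have hf1 : trues p1.1 ≤ f := le_trans (ite_trues_le _ _ f (i-1) j) hf0
    set p2 := if 0 < j ∧ get2 p1.1 i (j-1) = true
        then travA f p1.1 i (j-1) else (p1.1, 0) with hp2
    have hs2 : Shape R C p2.1 := ite_shape hs1 _ f i (j-1)
    have hf2 : trues p2.1 ≤ f := le_trans (ite_trues_le _ _ f i (j-1)) hf1
    rw [show p2.1.length = R from hs2.1]
    set p3 := if i + 1 < R ∧ get2 p2.1 (i+1) j = true
        then travA f p2.1 (i+1) j else (p2.1, 0) with hp3
    have hs3 : Shape R C p3.1 := ite_shape hs2 _ f (i+1) j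
    have hf3 : trues p3.1 ≤ f := le_trans (ite_trues_le _ _ f (i+1) j) hf2
    rw [show (p3.1.headD []).length = C from shape_headD hs3 (by omega)]
    set p4 := if j + 1 < C ∧ get2 p3.1 i (j+1) = true
        then travA f p3.1 i (j+1) else (p3.1, 0) with hp4
    rw [List.append_assoc, List.append_assoc, List.append_assoc]
    rw [seg f ih (set2 g i j) (0 < i) (i-1) j _ _ hs0 hf0]
    rw [seg f ih p1.1 (0 < j) i (j-1) _ _ hs1 hf1]
    rw [seg f ih p2.1 (i + 1 < R) (i+1) j _ _ hs2 hf2]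
    rw [seg f ih p3.1 (j + 1 < C) i (j+1) _ _ hs3 hf3]
    congr 1
    ring

def top3s (s : List Int) : Int × Int × Int :=
  ((s ++ [0,0,0]).getD 0 0, (s ++ [0,0,0]).getD 1 0, (s ++ [0,0,0]).getD 2 0)

theorem bump3_insertBy (s : List Int) (x : Int) (hx : 1 ≤ x) :
    top3s (PySem.List.insertBy (fun a b => decide (b < a)) x s) = bump3 (top3s s) x := by
  match s with
  | [] => simp [PySem.List.insertBy, top3s, bump3]; omega
  | [a] =>
    simp only [PySem.List.insertBy, top3s, bump3]
    split_ifs <;> simp_all <;> omega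
  | [a, b] =>
    simp only [PySem.List.insertBy, top3s, bump3]
    split_ifs <;> simp_all <;> omega
  | a :: b :: c :: t =>
    simp only [PySem.List.insertBy, top3s, bump3]
    split_ifs <;> simp_all <;> omega

theorem foldl_bump3 :
    ∀ (l : List Int) (s : List Int), (∀ x ∈ l, 1 ≤ x) →
      l.foldl bump3 (top3s s) =
        top3s (l.foldl (fun acc x => PySem.List.insertBy (fun a b => decide (b < a)) x acc) s) := by
  intro l
  induction l with
  | nil => intro s _; simp
  | cons x l ih =>
    intro s hl
    simp only [List.foldl_cons]
    rw [← bump3_insertBy s x (hl x (by simp))]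
    exact ih _ (fun y hy => hl y (by simp [hy]))

def StRel (R C : Nat) (a : List (List Bool) × Int × Int × Int) (b : List (List Bool) × List Int) : Prop :=
  a.1 = b.1 ∧ Shape R C a.1 ∧ a.2 = b.2.foldl bump3 ((0:Int), (0:Int), (0:Int)) ∧ ∀ x ∈ b.2, 1 ≤ x

theorem cell_rel (R C i j : Nat) (a : List (List Bool) × Int × Int × Int)
    (b : List (List Bool) × List Int) (h : StRel R C a b) :
    StRel R C
      (if get2 a.1 i j then
        let temp := travA (trues a.1) a.1 i j
        (temp.1, bump3 a.2 temp.2)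
      else a)
      (if get2 b.1 i j then
        let r := loopB R C b.1 [(i, j)] 0
        (r.1, b.2 ++ [r.2])
      else b) := by
  obtain ⟨e1, hs, e2, hp⟩ := h
  rw [← e1]
  by_cases hg : get2 a.1 i j
  · rw [if_pos hg, if_pos hg]
    have hr : loopB R C a.1 [(i, j)] 0 =
        ((travA (trues a.1) a.1 i j).1, 0 + (travA (trues a.1) a.1 i j).2) := by
      rw [loopB_travA (trues a.1) a.1 i j [] 0 hs le_rfl hg, loopB_nil]
    refine ⟨by simp [hr], travA_shape _ hs i j, ?_, ?_⟩
    · simp only [hr, List.foldl_append, List.foldl_cons, List.foldl_nil, ← e2, zero_add]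
    · intro x hx
      rcases List.mem_append.mp hx with hx | hx
      · exact hp x hx
      · simp [hr] at hx
        rw [hx]
        exact travA_size_pos _ _ i j
  · rw [if_neg hg, if_neg hg]
    exact ⟨e1, hs, e2, hp⟩

theorem row_rel (R C i : Nat) (js : List Nat) :
    ∀ (a : List (List Bool) × Int × Int × Int) (b : List (List Bool) × List Int), StRel R C a b →
      StRel R C
        (js.foldl (fun (st : List (List Bool) × Int × Int × Int) j =>
            if get2 st.1 i j then
              let temp := travA (trues st.1) st.1 i j
              (temp.1, bump3 st.2 temp.2)
            else st) a)
        (js.foldl (fun (st : List (List Bool) × List Int) j =>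
            if get2 st.1 i j then
              let r := loopB R C st.1 [(i, j)] 0
              (r.1, st.2 ++ [r.2])
            else st) b) := by
  induction js with
  | nil => intro a b h; exact h
  | cons j js ih =>
    intro a b h
    simp only [List.foldl_cons]
    exact ih _ _ (cell_rel R C i j a b h)

theorem grid_rel (R C N : Nat) (is : List Nat) :
    ∀ (a : List (List Bool) × Int × Int × Int) (b : List (List Bool) × List Int), StRel R C a b →
      StRel R C
        (is.foldl (fun st i =>
          (List.range N).foldl (fun (st : List (List Bool) × Int × Int × Int) j =>
            if get2 st.1 i j then
              let temp := travA (trues st.1) st.1 i j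
              (temp.1, bump3 st.2 temp.2)
            else st) st) a)
        (is.foldl (fun st i =>
          (List.range N).foldl (fun (st : List (List Bool) × List Int) j =>
            if get2 st.1 i j then
              let r := loopB R C st.1 [(i, j)] 0
              (r.1, st.2 ++ [r.2])
            else st) st) b) := by
  induction is with
  | nil => intro a b h; exact h
  | cons i is ih =>
    intro a b h
    simp only [List.foldl_cons]
    exact ih _ _ (row_rel R C i (List.range N) a b h)

theorem foldl_bump3_sorted (l : List Int) (hl : ∀ x ∈ l, 1 ≤ x) :
    l.foldl bump3 ((0:Int), (0:Int), (0:Int)) = top3s (PySem.List.sorted l (fun x => x) true) := by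
  have h0 : top3s [] = ((0:Int), (0:Int), (0:Int)) := rfl
  rw [PySem.List.sorted_rev_eq_foldl_insertBy l (fun x => x), ← h0, foldl_bump3 l [] hl]

theorem foldl_const {α β : Type} (l : List β) (f : α → β → α) (init : α)
    (h : ∀ a b, f a b = a) : l.foldl f init = init := by
  induction l generalizing init with
  | nil => rfl
  | cons b l ih => rw [List.foldl_cons, h]; exact ih init

-- ===== VERDICT (by name: the statement is the Claim_ definition above) =====
theorem top_three_basins_spec : Claim_equal_top_three_basins := by
  intro nrows ncols grid hdom hpre
  rcases hpre with hnp | hpre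
  · -- empty scan window: both programs never touch the grid and return (0,0,0)
    unfold Spec_top_three_basins top_three_basins top_three_basins_alt
    rcases hnp with hn | hn
    · rw [Int.toNat_of_nonpos hn]
      rfl
    · rw [Int.toNat_of_nonpos hn]
      simp only [List.range_zero, List.foldl_nil]
      rw [foldl_const _ _ _ (fun a b => rfl), foldl_const _ _ _ (fun a b => rfl)]
      rfl
  · have hs : Shape grid.length (grid.headD []).length grid := ⟨rfl, hpre.1⟩
    have key := grid_rel grid.length (grid.headD []).length ncols.toNat (List.range nrows.toNat)
        (grid, ((0:Int), (0:Int), (0:Int))) (grid, ([] : List Int))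
        ⟨rfl, hs, rfl, by simp⟩
    obtain ⟨e1, hsr, e2, hp⟩ := key
    unfold Spec_top_three_basins top_three_basins top_three_basins_alt
    rw [e2]
    exact foldl_bump3_sorted _ hp
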